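-- pv_equiv track=rewrite | github.com/hoshiyanatsu/AtCoder | kyoprotenkei/067_base8to9.py | eight2ten
-- ===== SOURCE A (Python) =====
-- def eight2ten(n_list:list) -> int:
--     l = len(n_list)
--     n10 = 0
--     i = 0
--     for _ in range(l):
--         x = n_list.pop()
--         n10 += x*8**i
--         i += 1
--
--     return n10
-- ===== SOURCE B (Python) =====
-- def eight2ten(n_list: list) -> int:
--     # Horner's method: one pass left-to-right (does not mutate the input,
--     # unlike A which empties n_list via pop()).
--     n10 = 0
--     for d in n_list:
--         n10 = n10 * 8 + d
--     return n10
-- ===== Notes on version B (the rewrite author's own statement) =====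
-- stated objective: faster
-- what changed: Replaces the pop-from-the-end loop that recomputes 8**i for each digit with a single left-to-right Horner pass (acc = acc*8 + digit); B also does not mutate the input list.
import Mathlib
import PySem

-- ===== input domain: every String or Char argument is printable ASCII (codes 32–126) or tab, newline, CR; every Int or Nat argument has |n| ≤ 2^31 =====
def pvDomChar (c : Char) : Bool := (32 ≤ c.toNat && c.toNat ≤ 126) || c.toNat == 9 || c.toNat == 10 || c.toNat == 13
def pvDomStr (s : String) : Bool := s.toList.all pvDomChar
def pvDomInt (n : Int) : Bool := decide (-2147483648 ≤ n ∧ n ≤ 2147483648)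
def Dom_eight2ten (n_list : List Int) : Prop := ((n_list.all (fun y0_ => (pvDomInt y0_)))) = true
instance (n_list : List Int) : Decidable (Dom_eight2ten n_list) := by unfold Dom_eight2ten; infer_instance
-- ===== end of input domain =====

-- B replaces A's pop-from-the-end loop with repeated 8**i by a single Horner pass (faster in a timing run);
-- equivalence is about the RETURN value only: A empties its argument via pop(), B does not mutate it.

-- ===== PORT A =====
-- loop body: x = n_list.pop(); n10 += x*8**i; i += 1 — pop() on a nonempty list
-- returns the last element and drops it (exact; the fuel equals the length so the list is never empty).
def eight2tenLoop : Nat → List Int → Int → Nat → Int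
  | 0, _, n10, _ => n10
  | fuel+1, lst, n10, i =>
      match lst.getLast? with
      | some x => eight2tenLoop fuel lst.dropLast (n10 + x * 8 ^ i) (i + 1)
      | none => n10

def eight2ten (n_list : List Int) : Int :=
  eight2tenLoop n_list.length n_list 0 0

-- ===== PORT B =====
def eight2ten_alt (n_list : List Int) : Int :=
  n_list.foldl (fun n10 d => n10 * 8 + d) 0

-- ===== PRECONDITION & SPEC =====
def Spec_eight2ten (n_list : List Int) (out : Int) : Prop := out = eight2ten_alt n_list
instance (n_list : List Int) (out : Int) : Decidable (Spec_eight2ten n_list out) := by unfold Spec_eight2ten; infer_instance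

-- ===== CLAIM (what is proved, stated in full; the proofs are below) =====
def Claim_equal_eight2ten : Prop := ∀ (n_list : List Int), Dom_eight2ten n_list → Spec_eight2ten n_list (eight2ten n_list)

-- ===== LEMMAS AND PROOFS =====
theorem horner_append (ys : List Int) (x a : Int) :
    (ys ++ [x]).foldl (fun n10 d => n10 * 8 + d) a
      = (ys.foldl (fun n10 d => n10 * 8 + d) a) * 8 + x := by
  simp

theorem eight2tenLoop_horner (lst : List Int) (n10 : Int) (i : Nat) :
    eight2tenLoop lst.length lst n10 i
      = n10 + (lst.foldl (fun a d => a * 8 + d) 0) * 8 ^ i := by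
  induction lst using List.reverseRecOn generalizing n10 i with
  | nil => simp [eight2tenLoop]
  | append_singleton ys x ih =>
      have h1 : (ys ++ [x]).getLast? = some x := by simp
      have h2 : (ys ++ [x]).dropLast = ys := by simp
      rw [show (ys ++ [x]).length = ys.length + 1 by simp]
      simp only [eight2tenLoop, h1, h2]
      rw [ih, horner_append]
      ring

-- ===== VERDICT (by name: the statement is the Claim_ definition above) =====
theorem eight2ten_spec : Claim_equal_eight2ten := by
  intro n_list _
  unfold Spec_eight2ten eight2ten eight2ten_alt
  rw [eight2tenLoop_horner]
  ring
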